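-- pv_equiv track=rewrite | github.com/ShonnyAIO/Python-Notes | Topicos Avanzados/Backtracking/sudoku.py | verificar_repetidos_submatriz
-- ===== SOURCE A (Python) =====
-- def verificar_repetidos_submatriz(l, filas, columnas):
--     lista_submatriz = []
--     for i in filas:
--         for j in columnas:
--             lista_submatriz.append(l[i][j])
--     # si no hay 0s en la submatriz, no hay nada que verificar, ya anteriormente se verifico
--     if(0 in lista_submatriz):
--         lista_submatriz.sort()
--         for i in range(0, 8):
--             if(not lista_submatriz[i] == 0 and lista_submatriz[i] == lista_submatriz[i+1]):
--                 return False
--     return True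
-- ===== SOURCE B (Python) =====
-- def verificar_repetidos_submatriz(l, filas, columnas):
--     vals = [l[i][j] for i in filas for j in columnas]
--     if 0 in vals:
--         seen = set()
--         for v in vals:
--             if v != 0:
--                 if v in seen:
--                     return False
--                 seen.add(v)
--     return True
-- ===== Notes on version B (the rewrite author's own statement) =====
-- stated objective: idiomatic
-- what changed: B replaces A's sort-then-adjacent-pair scan by a single pass over the collected values maintaining a set of seen non-zero values, returning False on the first repeat; Pre_ excludes only the inputs where A raises IndexError (an out-of-range row/column index, or a submatrix with fewer than 9 cells containing a 0 whose sorted scan runs past the end).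
-- intended difference: On submatrices with more than 9 cells that contain a 0 and a duplicated non-zero value all of whose occurrences lie beyond the first 9 sorted positions, A returns True because its scan only examines sorted indices 0..8, while B returns False; B's value is intended since such a submatrix does contain a repeated non-zero value. — e.g. on verificar_repetidos_submatriz([[0, 1, 2, 3, 4, 5, 6, 7, 9, 9]], [0], [0, 1, 2, 3, 4, 5, 6, 7, 8, 9]): A returns true, B returns false
import Mathlib
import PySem

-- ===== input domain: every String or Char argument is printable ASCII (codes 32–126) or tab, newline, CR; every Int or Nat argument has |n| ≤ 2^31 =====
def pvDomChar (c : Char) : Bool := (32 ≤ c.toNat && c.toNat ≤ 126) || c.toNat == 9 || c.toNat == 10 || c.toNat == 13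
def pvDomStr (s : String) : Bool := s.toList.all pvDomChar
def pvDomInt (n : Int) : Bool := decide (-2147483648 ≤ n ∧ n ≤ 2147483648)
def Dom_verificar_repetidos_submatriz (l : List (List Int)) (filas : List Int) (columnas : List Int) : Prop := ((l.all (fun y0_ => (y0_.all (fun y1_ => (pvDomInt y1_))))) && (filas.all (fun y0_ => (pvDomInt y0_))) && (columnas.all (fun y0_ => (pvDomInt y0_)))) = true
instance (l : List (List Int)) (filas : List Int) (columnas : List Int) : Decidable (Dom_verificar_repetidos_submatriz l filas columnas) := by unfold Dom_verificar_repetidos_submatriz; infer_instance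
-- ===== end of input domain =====

-- B replaces A's sort + adjacent-pair scan by a single pass with a seen-set of non-zero
-- values (objective: idiomatic); where A's 9-cell-only scan misses a duplicate (D_) B
-- reports it; Pre_ excludes the inputs where A raises IndexError.

-- ===== PORT A =====
-- A's nested append-loops building lista_submatriz (also the value list Pre_/D_ talk about)
def pvLista (l : List (List Int)) (filas : List Int) (columnas : List Int) : List Int :=
  filas.foldl (fun acc i =>
    columnas.foldl (fun acc2 j =>
      acc2 ++ [PySem.List.pyGetD (PySem.List.pyGetD l i []) j 0]) acc) []

def verificar_repetidos_submatriz (l : List (List Int)) (filas : List Int) (columnas : List Int) : Bool :=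
  let lista := pvLista l filas columnas
  if 0 ∈ lista then
    let s := PySem.List.sorted lista (fun x => x) false
    (PySem.List.pyRange 0 8 1).foldl (fun r i =>
      if r = false then false
      else if PySem.List.pyGetD s i 0 ≠ 0 ∧ PySem.List.pyGetD s i 0 = PySem.List.pyGetD s (i + 1) 0
      then false else r) true
  else true

-- ===== PORT B =====
-- B's loop: walk the values once keeping the set of seen non-zero values
def pvScan : List Int → PySem.Set Int → Bool
  | [], _ => true
  | v :: rest, seen =>
    if v ≠ 0 then
      if PySem.Set.contains seen v then false
      else pvScan rest (PySem.Set.add seen v)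
    else pvScan rest seen

def verificar_repetidos_submatriz_alt (l : List (List Int)) (filas : List Int) (columnas : List Int) : Bool :=
  let vals :=
    filas.flatMap (fun i => columnas.map (fun j => PySem.List.pyGetD (PySem.List.pyGetD l i []) j 0))
  if 0 ∈ vals then pvScan vals PySem.Set.empty else true

-- ===== PRECONDITION & SPEC =====
-- inputs on which A's sorted-list scan reads past the end: a 0 present, at most 8 cells,
-- no duplicated non-zero value, and (with exactly 8 cells) some positive value
def pvCrash (vals : List Int) : Bool :=
  decide (0 ∈ vals) && decide (vals.length ≤ 8) &&
    !(vals.any (fun v => decide (v ≠ 0) && decide (2 ≤ vals.count v))) &&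
    (decide (vals.length = 8) → vals.any (fun v => decide (0 < v)))

-- Pre_ excludes exactly the inputs where the Python A raises IndexError: an out-of-range
-- (after Python's negative wrap) row or column index, or the sorted-scan overrun of pvCrash.
def Pre_verificar_repetidos_submatriz (l : List (List Int)) (filas : List Int) (columnas : List Int) : Prop :=
  (columnas ≠ [] → ∀ i ∈ filas, ∃ row, PySem.List.pyGet? l i = some row ∧ ∀ j ∈ columnas, (PySem.List.pyGet? row j).isSome) ∧
  ¬ pvCrash (pvLista l filas columnas) = true

instance (l : List (List Int)) (filas : List Int) (columnas : List Int) : Decidable (Pre_verificar_repetidos_submatriz l filas columnas) := by unfold Pre_verificar_repetidos_submatriz; infer_instance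

def pvWitness_verificar_repetidos_submatriz : List (List Int) × List Int × List Int :=
  ([[1, 0, 2], [3, 4, 5], [6, 7, 8]], [0, 1, 2], [0, 1, 2])

-- On submatrices with more than 9 cells containing a 0 and a duplicated non-zero value all of
-- whose occurrences lie beyond the first 9 sorted positions, A returns True (its scan only
-- looks at sorted indices 0..8) while B returns False; B's value is intended, the submatrix
-- really does repeat a non-zero value.
def D_verificar_repetidos_submatriz (l : List (List Int)) (filas : List Int) (columnas : List Int) : Prop :=
  let V := pvLista l filas columnas
  0 ∈ V ∧ ¬ (V.filter (· ≠ 0)).Nodup ∧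
    ∀ v ∈ V, v ≠ 0 → 2 ≤ V.count v → 7 < V.countP (· < v)

instance (l : List (List Int)) (filas : List Int) (columnas : List Int) : Decidable (D_verificar_repetidos_submatriz l filas columnas) := by unfold D_verificar_repetidos_submatriz; infer_instance

def Spec_verificar_repetidos_submatriz (l : List (List Int)) (filas : List Int) (columnas : List Int) (out : Bool) : Prop := ¬ D_verificar_repetidos_submatriz l filas columnas → out = verificar_repetidos_submatriz_alt l filas columnas
instance (l : List (List Int)) (filas : List Int) (columnas : List Int) (out : Bool) : Decidable (Spec_verificar_repetidos_submatriz l filas columnas out) := by unfold Spec_verificar_repetidos_submatriz; infer_instance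

def pvDiffWitness_verificar_repetidos_submatriz : List (List Int) × List Int × List Int :=
  ([[0, 1, 2, 3, 4, 5, 6, 7, 9, 9]], [0], [0, 1, 2, 3, 4, 5, 6, 7, 8, 9])

def pvDiffWitnessOut_verificar_repetidos_submatriz : Bool × Bool := (true, false)

-- ===== CLAIM (what is proved, stated in full; the proofs are below) =====
def Claim_unchanged_verificar_repetidos_submatriz : Prop := ∀ (l : List (List Int)) (filas : List Int) (columnas : List Int), Dom_verificar_repetidos_submatriz l filas columnas → Pre_verificar_repetidos_submatriz l filas columnas → Spec_verificar_repetidos_submatriz l filas columnas (verificar_repetidos_submatriz l filas columnas)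
def Claim_changed_verificar_repetidos_submatriz : Prop := Dom_verificar_repetidos_submatriz (pvDiffWitness_verificar_repetidos_submatriz.1) (pvDiffWitness_verificar_repetidos_submatriz.2.1) (pvDiffWitness_verificar_repetidos_submatriz.2.2) ∧ Pre_verificar_repetidos_submatriz (pvDiffWitness_verificar_repetidos_submatriz.1) (pvDiffWitness_verificar_repetidos_submatriz.2.1) (pvDiffWitness_verificar_repetidos_submatriz.2.2) ∧ D_verificar_repetidos_submatriz (pvDiffWitness_verificar_repetidos_submatriz.1) (pvDiffWitness_verificar_repetidos_submatriz.2.1) (pvDiffWitness_verificar_repetidos_submatriz.2.2) ∧ verificar_repetidos_submatriz (pvDiffWitness_verificar_repetidos_submatriz.1) (pvDiffWitness_verificar_repetidos_submatriz.2.1) (pvDiffWitness_verificar_repetidos_submatriz.2.2) = pvDiffWitnessOut_verificar_repetidos_submatriz.1 ∧ verificar_repetidos_submatriz_alt (pvDiffWitness_verificar_repetidos_submatriz.1) (pvDiffWitness_verificar_repetidos_submatriz.2.1) (pvDiffWitness_verificar_repetidos_submatriz.2.2) = pvDiffWitnessOut_verificar_repetidos_submatriz.2 ∧ pvDiffWitnessOut_verificar_repetidos_submatriz.1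 ≠ pvDiffWitnessOut_verificar_repetidos_submatriz.2
def Claim_exact_verificar_repetidos_submatriz : Prop := ∀ (l : List (List Int)) (filas : List Int) (columnas : List Int), Dom_verificar_repetidos_submatriz l filas columnas → Pre_verificar_repetidos_submatriz l filas columnas → D_verificar_repetidos_submatriz l filas columnas → verificar_repetidos_submatriz l filas columnas ≠ verificar_repetidos_submatriz_alt l filas columnas

-- ===== LEMMAS AND PROOFS =====

-- a repeated non-zero value = the non-zero values are not nodup
lemma pv_dup_iff (V : List Int) :
    (¬ (V.filter (· ≠ 0)).Nodup) ↔ (∃ v ∈ V, v ≠ 0 ∧ 2 ≤ V.count v) := by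
  rw [List.nodup_iff_count_le_one]
  push Not
  constructor
  · rintro ⟨v, h⟩
    have hm : v ∈ V.filter (· ≠ 0) := List.count_pos_iff.mp (by omega)
    have hv : v ≠ (0 : Int) := by simpa using List.of_mem_filter hm
    have hle := List.Sublist.count_le v (List.filter_sublist (l := V) (p := (· ≠ 0)))
    exact ⟨v, List.mem_of_mem_filter hm, hv, by omega⟩
  · rintro ⟨v, _, hv, hc⟩
    refine ⟨v, ?_⟩
    rw [List.count_filter (by simpa using hv)]
    omega

lemma pv_flatten_singleton (g : Int → Int) (cols : List Int) :
    (cols.map (fun j => [g j])).flatten = cols.map g := by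
  induction cols with
  | nil => rfl
  | cons c t ih => simp [ih]

-- A's nested append-loops build exactly the comprehension list
lemma pv_lista_eq (l : List (List Int)) (filas columnas : List Int) :
    pvLista l filas columnas =
    filas.flatMap (fun i => columnas.map (fun j => PySem.List.pyGetD (PySem.List.pyGetD l i []) j 0)) := by
  simp [pvLista, List.flatMap, pv_flatten_singleton]

-- A's early-exit False loop = negated any
lemma pv_foldl_earlyfalse (p : Int → Prop) [DecidablePred p] (L : List Int) (b : Bool) :
    L.foldl (fun r i => if r = false then false else if p i then false else r) b =
      (b && !L.any (fun i => decide (p i))) := by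
  induction L generalizing b with
  | nil => simp
  | cons a t ih =>
    simp only [List.foldl_cons, List.any_cons, ih]
    by_cases hb : b = false
    · subst hb; simp
    · replace hb : b = true := by revert hb; cases b <;> simp
      subst hb; by_cases hp : p a <;> simp [hp]

-- a getD-padded adjacent-pair test is an in-range adjacent-pair test
lemma pv_cond_iff (s : List Int) (k : Nat) :
    (s.getD k 0 ≠ 0 ∧ s.getD k 0 = s.getD (k+1) 0) ↔
    (∃ _ : k + 1 < s.length, s[k] ≠ 0 ∧ s[k] = s[k+1]) := by
  constructor
  · rintro ⟨h1, h2⟩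
    by_cases hk : k + 1 < s.length
    · refine ⟨hk, ?_, ?_⟩
      · rwa [List.getD_eq_getElem _ _ (by omega)] at h1
      · rwa [List.getD_eq_getElem _ _ (by omega), List.getD_eq_getElem _ _ hk] at h2
    · exfalso
      by_cases hk2 : k < s.length
      · rw [List.getD_eq_default s 0 (n := k+1) (by omega)] at h2
        rw [h2] at h1; exact h1 rfl
      · rw [List.getD_eq_default s 0 (n := k) (by omega)] at h1; exact h1 rfl
  · rintro ⟨h, h1, h2⟩
    rw [List.getD_eq_getElem _ _ (by omega), List.getD_eq_getElem _ _ h]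
    exact ⟨h1, h2⟩

-- in a sorted list the elements < v are exactly the countP-prefix
lemma pv_sorted_split (s : List Int) (hs : s.Pairwise (· ≤ ·)) (v : Int) :
    s = s.filter (fun x => decide (x < v)) ++ s.filter (fun x => decide (¬ x < v)) := by
  induction s with
  | nil => simp
  | cons a t ih =>
    rcases List.pairwise_cons.mp hs with ⟨hat, ht⟩
    by_cases ha : a < v
    · simp only [List.filter_cons, ha, decide_true, not_true, decide_false]
      simpa using ih ht
    · have h0 : ∀ x ∈ a :: t, ¬ x < v := by
        intro x hx
        rcases List.mem_cons.mp hx with rfl | hx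
        · exact ha
        · have := hat x hx; omega
      have h1 : (a :: t).filter (fun x => decide (x < v)) = [] := by
        apply List.filter_eq_nil_iff.mpr; intro x hx; simpa using h0 x hx
      have h2 : (a :: t).filter (fun x => decide (¬ x < v)) = a :: t := by
        apply List.filter_eq_self.mpr; intro x hx; simpa using h0 x hx
      rw [h1, h2]; rfl

-- a sorted list whose minimum-bounded elements contain v at least twice starts v :: v :: _
lemma pv_head2 (v : Int) (G : List Int) (hG : G.Pairwise (· ≤ ·)) (hall : ∀ x ∈ G, v ≤ x)
    (h2 : 2 ≤ G.count v) : ∃ rest, G = v :: v :: rest := by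
  match G with
  | [] => simp at h2
  | [b] =>
    simp [List.count_singleton] at h2; split at h2 <;> omega
  | b :: c :: rest =>
    have hvb : v ≤ b := hall b (by simp)
    rcases List.pairwise_cons.mp hG with ⟨hb, hG'⟩
    have hbv : b = v := by
      by_contra hne
      have hcnt : (b :: c :: rest).count v = (c :: rest).count v := by
        rw [List.count_cons]
        simp [hne]
      have hvmem : v ∈ c :: rest := List.count_pos_iff.mp (by omega)
      have := hb v hvmem
      omega
    subst hbv
    have hc2 : 1 ≤ (c :: rest).count b := by
      have : (b :: c :: rest).count b = (c :: rest).count b + 1 := by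
        rw [List.count_cons]; simp
      omega
    have hcv : c = b := by
      have hvmem : b ∈ c :: rest := List.count_pos_iff.mp (by omega)
      rcases List.mem_cons.mp hvmem with rfl | hmem
      · rfl
      · have h1 := (List.pairwise_cons.mp hG').1 b hmem
        have h2 := hb c (by simp)
        omega
    subst hcv
    exact ⟨rest, rfl⟩

-- the core characterisation: adjacent duplicate among the first 9 of a sorted list
-- = duplicated value with at most 7 strictly smaller elements
lemma pv_key (s : List Int) (hs : s.Pairwise (· ≤ ·)) :
    (∃ k : Nat, k ≤ 7 ∧ ∃ h : k + 1 < s.length, s[k] ≠ 0 ∧ s[k] = s[k+1]) ↔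
    (∃ v ∈ s, v ≠ 0 ∧ 2 ≤ s.count v ∧ s.countP (fun x => decide (x < v)) ≤ 7) := by
  constructor
  · rintro ⟨k, hk, h, hne, heq⟩
    obtain ⟨v, hvk⟩ : ∃ v, s[k] = v := ⟨_, rfl⟩
    rw [hvk] at hne heq
    refine ⟨v, by rw [← hvk]; exact List.getElem_mem _, hne, ?_, ?_⟩
    · have hd1 : s.drop k = s[k] :: s.drop (k+1) := (List.getElem_cons_drop (by omega)).symm
      have hd2 : s.drop (k+1) = s[k+1] :: s.drop (k+2) := (List.getElem_cons_drop (by omega)).symm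
      have hsub : (s.drop k).count v ≤ s.count v := (List.drop_sublist k s).count_le _
      rw [hd1, hd2, hvk, ← heq] at hsub
      simp at hsub
      omega
    · have hsplit : s.countP (fun x => decide (x < v)) =
          (s.take k).countP (fun x => decide (x < v)) +
          (s.drop k).countP (fun x => decide (x < v)) := by
        conv_lhs => rw [← List.take_append_drop k s]
        rw [List.countP_append]
      have h1 : (s.take k).countP (fun x => decide (x < v)) ≤ k := by
        calc (s.take k).countP _ ≤ (s.take k).length := List.countP_le_length
        _ ≤ k := by simp
      have h2 : (s.drop k).countP (fun x => decide (x < v)) = 0 := by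
        apply List.countP_eq_zero.mpr
        intro x hx
        have hdp : (s.drop k).Pairwise (· ≤ ·) := hs.sublist (List.drop_sublist k s)
        have hd1 : s.drop k = s[k] :: s.drop (k+1) := (List.getElem_cons_drop (by omega)).symm
        rw [hd1, hvk] at hx hdp
        rcases List.mem_cons.mp hx with rfl | hx'
        · simp
        · have := (List.pairwise_cons.mp hdp).1 x hx'
          simp; omega
      omega
  · rintro ⟨v, hv, hne, hc, hf⟩
    obtain ⟨F, rest, hseq, hf7⟩ : ∃ F rest, s = F ++ v :: v :: rest ∧ F.length ≤ 7 := by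
      have hsplit := pv_sorted_split s hs v
      set F := s.filter (fun x => decide (x < v)) with hF
      set G := s.filter (fun x => decide (¬ x < v)) with hG
      have hcntF : F.count v = 0 := by
        apply List.count_eq_zero.mpr
        intro hmem
        have := List.of_mem_filter hmem
        simp at this
      have hcntG : 2 ≤ G.count v := by
        have : s.count v = F.count v + G.count v := by
          conv_lhs => rw [hsplit]
          rw [List.count_append]
        omega
      have hGp : G.Pairwise (· ≤ ·) := hs.sublist List.filter_sublist
      have hGall : ∀ x ∈ G, v ≤ x := by
        intro x hx
        have := List.of_mem_filter hx
        simp at this; omega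
      obtain ⟨rest, hGeq⟩ := pv_head2 v G hGp hGall hcntG
      refine ⟨F, rest, by rw [hsplit, hGeq], ?_⟩
      have : F.length = s.countP (fun x => decide (x < v)) := by
        rw [hF, ← List.countP_eq_length_filter]
      omega
    subst hseq
    refine ⟨F.length, hf7, ?_, ?_⟩
    · simp
    · have e1 : (F ++ v :: v :: rest)[F.length]'(by simp) = v := by
        rw [List.getElem_append_right (by omega)]
        simp
      have e2 : (F ++ v :: v :: rest)[F.length + 1]'(by simp) = v := by
        rw [List.getElem_append_right (by omega)]
        simp
      rw [e1, e2]
      exact ⟨hne, rfl⟩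

-- A returns False exactly on: a 0 present and a duplicated non-zero value among the first 9 sorted slots
lemma pv_A_false_iff (l : List (List Int)) (filas columnas : List Int) :
    (verificar_repetidos_submatriz l filas columnas = false) ↔
    (0 ∈ pvLista l filas columnas ∧
      ∃ v ∈ pvLista l filas columnas, v ≠ 0 ∧ 2 ≤ (pvLista l filas columnas).count v ∧
        (pvLista l filas columnas).countP (fun x => decide (x < v)) ≤ 7) := by
  unfold verificar_repetidos_submatriz
  by_cases hmem : 0 ∈ pvLista l filas columnas
  · simp only [hmem, if_pos]
    set vals := pvLista l filas columnas with hvals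
    set s := PySem.List.sorted vals (fun x => x) false with hsdef
    have hs : s.Pairwise (· ≤ ·) := by
      have := PySem.List.sorted_pairwise (xs := vals) (key := fun x => x)
      simpa using this
    have hperm : s.Perm vals := PySem.List.sorted_perm _ _ _
    rw [pv_foldl_earlyfalse (p := fun i =>
      PySem.List.pyGetD s i 0 ≠ 0 ∧ PySem.List.pyGetD s i 0 = PySem.List.pyGetD s (i + 1) 0)]
    have hL : ((PySem.List.pyRange 0 8 1).any (fun i => decide
        (PySem.List.pyGetD s i 0 ≠ 0 ∧ PySem.List.pyGetD s i 0 = PySem.List.pyGetD s (i + 1) 0)) = true) ↔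
        (∃ k : Nat, k ≤ 7 ∧ ∃ h : k + 1 < s.length, s[k] ≠ 0 ∧ s[k] = s[k+1]) := by
      rw [List.any_eq_true]
      constructor
      · rintro ⟨i, hi, hp⟩
        rw [PySem.List.mem_pyRange_one] at hi
        obtain ⟨h0, h8⟩ := hi
        lift i to ℕ using h0 with k
        refine ⟨k, by omega, ?_⟩
        rw [decide_eq_true_iff] at hp
        rw [show (k : Int) + 1 = ((k + 1 : Nat) : Int) from by push_cast; ring] at hp
        rw [PySem.List.pyGetD_natCast, PySem.List.pyGetD_natCast] at hp
        exact (pv_cond_iff s k).mp hp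
      · rintro ⟨k, hk, hcond⟩
        refine ⟨(k : Int), PySem.List.mem_pyRange_one.mpr ⟨by omega, by omega⟩, ?_⟩
        rw [decide_eq_true_iff]
        rw [show (k : Int) + 1 = ((k + 1 : Nat) : Int) from by push_cast; ring]
        rw [PySem.List.pyGetD_natCast, PySem.List.pyGetD_natCast]
        exact (pv_cond_iff s k).mpr hcond
    have hR : (∃ k : Nat, k ≤ 7 ∧ ∃ h : k + 1 < s.length, s[k] ≠ 0 ∧ s[k] = s[k+1]) ↔
        (∃ v ∈ vals, v ≠ 0 ∧ 2 ≤ vals.count v ∧ vals.countP (fun x => decide (x < v)) ≤ 7) := by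
      rw [pv_key s hs]
      constructor
      · rintro ⟨v, hv, h1, h2, h3⟩
        exact ⟨v, hperm.mem_iff.mp hv, h1, by rw [← hperm.count_eq]; exact h2,
          by rw [← hperm.countP_eq]; exact h3⟩
      · rintro ⟨v, hv, h1, h2, h3⟩
        exact ⟨v, hperm.mem_iff.mpr hv, h1, by rw [hperm.count_eq]; exact h2,
          by rw [hperm.countP_eq]; exact h3⟩
    set A := (PySem.List.pyRange 0 8 1).any (fun i => decide
      (PySem.List.pyGetD s i 0 ≠ 0 ∧ PySem.List.pyGetD s i 0 = PySem.List.pyGetD s (i + 1) 0)) with hA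
    constructor
    · intro hfold
      have hAt : A = true := by revert hfold; cases A <;> simp
      exact ⟨by simp, hR.mp (hL.mp hAt)⟩
    · rintro ⟨_, hex⟩
      have hAt : A = true := hL.mpr (hR.mpr hex)
      rw [hAt]
      rfl
  · simp [hmem]

-- B's seen-set loop: returns False iff some non-zero value is in seen and recurs, or repeats
lemma pv_scan_false_iff (xs : List Int) (seen : PySem.Set Int) :
    (pvScan xs seen = false) ↔
    (∃ v, v ≠ 0 ∧ ((v ∈ seen ∧ v ∈ xs) ∨ 2 ≤ xs.count v)) := by
  induction xs generalizing seen with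
  | nil => simp [pvScan]
  | cons a t ih =>
    by_cases ha : a = (0 : Int)
    · subst ha
      simp only [pvScan, ne_eq, not_true_eq_false, if_false, ih]
      constructor
      · rintro ⟨v, hv, h⟩
        refine ⟨v, hv, ?_⟩
        rcases h with ⟨h1, h2⟩ | h2
        · exact Or.inl ⟨h1, List.mem_cons_of_mem _ h2⟩
        · refine Or.inr ?_
          rw [List.count_cons]
          omega
      · rintro ⟨v, hv, h⟩
        refine ⟨v, hv, ?_⟩
        rcases h with ⟨h1, h2⟩ | h2
        · rcases List.mem_cons.mp h2 with rfl | h2'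
          · exact absurd rfl hv
          · exact Or.inl ⟨h1, h2'⟩
        · refine Or.inr ?_
          rw [List.count_cons] at h2
          simp [Ne.symm hv] at h2
          exact h2
    · by_cases hc : PySem.Set.contains seen a = true
      · have hmemseen : a ∈ seen := by
          have := hc
          simp [PySem.Set.contains] at this
          exact this
        simp only [pvScan, ha, ne_eq, not_false_eq_true, if_true, hc]
        constructor
        · intro _
          exact ⟨a, ha, Or.inl ⟨hmemseen, List.mem_cons_self⟩⟩
        · intro _
          trivial
      · have hnmem : a ∉ seen := by
          intro hmem
          apply hc
          simp [PySem.Set.contains]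
          exact hmem
        have hcf : PySem.Set.contains seen a = false := by
          cases h : PySem.Set.contains seen a
          · rfl
          · exact absurd h hc
        simp only [pvScan, ha, ne_eq, not_false_eq_true, if_true, hcf, Bool.false_eq_true, if_false, ih]
        constructor
        · rintro ⟨v, hv, h⟩
          refine ⟨v, hv, ?_⟩
          rcases h with ⟨h1, h2⟩ | h2
          · rcases (PySem.Set.mem_add (s := seen) (x := a) (y := v)).mp h1 with h1' | rfl
            · exact Or.inl ⟨h1', List.mem_cons_of_mem _ h2⟩
            · refine Or.inr ?_
              have : 1 ≤ t.count v := List.count_pos_iff.mpr h2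
              rw [List.count_cons, if_pos (by simp)]
              omega
          · refine Or.inr ?_
            rw [List.count_cons]
            omega
        · rintro ⟨v, hv, h⟩
          refine ⟨v, hv, ?_⟩
          rcases h with ⟨h1, h2⟩ | h2
          · have hva : v ≠ a := fun h => hnmem (h ▸ h1)
            rcases List.mem_cons.mp h2 with rfl | h2'
            · exact absurd rfl hva
            · exact Or.inl ⟨(PySem.Set.mem_add (s := seen) (x := a) (y := v)).mpr (Or.inl h1), h2'⟩
          · by_cases hva : v = a
            · subst hva
              rw [List.count_cons, if_pos (by simp)] at h2
              have hvt : v ∈ t := List.count_pos_iff.mp (by omega)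
              exact Or.inl ⟨(PySem.Set.mem_add (s := seen) (x := v) (y := v)).mpr (Or.inr rfl), hvt⟩
            · refine Or.inr ?_
              rw [List.count_cons] at h2
              simp [Ne.symm hva] at h2
              exact h2

-- B returns False exactly-- B returns False exactly on: a 0 present and a duplicated non-zero value
lemma pv_B_false_iff (l : List (List Int)) (filas columnas : List Int) :
    (verificar_repetidos_submatriz_alt l filas columnas = false) ↔
    (0 ∈ pvLista l filas columnas ∧
      ∃ v ∈ pvLista l filas columnas, v ≠ 0 ∧ 2 ≤ (pvLista l filas columnas).count v) := by
  unfold verificar_repetidos_submatriz_alt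
  rw [show filas.flatMap (fun i => columnas.map (fun j =>
        PySem.List.pyGetD (PySem.List.pyGetD l i []) j 0)) = pvLista l filas columnas from
    (pv_lista_eq l filas columnas).symm]
  by_cases hmem : 0 ∈ pvLista l filas columnas
  · rw [if_pos hmem, pv_scan_false_iff]
    constructor
    · rintro ⟨v, hv, h⟩
      rcases h with ⟨h1, _⟩ | h2
      · exact absurd h1 (by simp [PySem.Set.empty])
      · exact ⟨hmem, v, List.count_pos_iff.mp (by omega), hv, h2⟩
    · rintro ⟨_, v, _, hv, h2⟩
      exact ⟨v, hv, Or.inr h2⟩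
  · rw [if_neg hmem]
    simp [hmem]

-- ===== VERDICT (by name: the statement is the Claim_ definition above) =====
theorem verificar_repetidos_submatriz_spec : Claim_unchanged_verificar_repetidos_submatriz := by
  intro l filas columnas _ _
  unfold Spec_verificar_repetidos_submatriz
  intro hnd
  have h : (verificar_repetidos_submatriz l filas columnas = false) ↔
      (verificar_repetidos_submatriz_alt l filas columnas = false) := by
    constructor
    · intro hA
      obtain ⟨h0, v, hv, hne, hc, _⟩ := (pv_A_false_iff l filas columnas).mp hA
      exact (pv_B_false_iff l filas columnas).mpr ⟨h0, v, hv, hne, hc⟩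
    · intro hB
      obtain ⟨h0, hdup⟩ := (pv_B_false_iff l filas columnas).mp hB
      by_cases hPr : ∃ v ∈ pvLista l filas columnas, v ≠ 0 ∧ 2 ≤ (pvLista l filas columnas).count v ∧
          (pvLista l filas columnas).countP (fun x => decide (x < v)) ≤ 7
      · exact (pv_A_false_iff l filas columnas).mpr ⟨h0, hPr⟩
      · refine absurd ⟨h0, (pv_dup_iff _).mpr hdup, fun v hv hne hc => ?_⟩ hnd
        by_contra hgt
        exact hPr ⟨v, hv, hne, hc, by omega⟩
  cases hA : verificar_repetidos_submatriz l filas columnas <;>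
    cases hB : verificar_repetidos_submatriz_alt l filas columnas
  · rfl
  · exact absurd (h.mp hA) (by simp [hB])
  · exact absurd (h.mpr hB) (by simp [hA])
  · rfl

theorem verificar_repetidos_submatriz_changed : Claim_changed_verificar_repetidos_submatriz := by
  unfold Claim_changed_verificar_repetidos_submatriz; decide

theorem verificar_repetidos_submatriz_tight : Claim_exact_verificar_repetidos_submatriz := by
  intro l filas columnas _ _ hd heq
  obtain ⟨h0, hdup, hall⟩ := hd
  have hB : verificar_repetidos_submatriz_alt l filas columnas = false :=
    (pv_B_false_iff l filas columnas).mpr ⟨h0, (pv_dup_iff _).mp hdup⟩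
  have hA : verificar_repetidos_submatriz l filas columnas = false := heq.trans hB
  obtain ⟨_, v, hv, hne, hc, hr⟩ := (pv_A_false_iff l filas columnas).mp hA
  exact absurd (hall v hv hne hc) (by omega)
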